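-- pv_equiv track=rewrite | github.com/pypi-data/pypi-mirror-88 | packages/incenp.davpoint/incenp.davpoint-0.2.0-py3-none-any.whl/incenp/davpoint/davfs2.py | _parse_secrets_line
-- ===== SOURCE A (Python) =====
-- def _parse_secrets_line(line):
--     fields = []
--     in_quote = False
--     escaped = False
--     field = ''
--     for c in line:
--         if in_quote:
--             if c == '"' and not escaped:
--                 in_quote = False
--                 fields.append(field)
--                 field = ''
--             else:
--                 field += c
--         elif escaped:
--             if c in (' ', '\t', '#', '\\', '"'):
--                 field += c
--                 escaped = False
--             else:
--                 field += '\\'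
--                 field += c
--                 escaped = False
--         elif c in (' ', '\t', '\n'):
--             fields.append(field)
--             field = ''
--         else:
--             field += c
--     return fields
-- ===== SOURCE B (Python) =====
-- def _parse_secrets_line(line):
--     # The quote/escape state in the original is dead code (never set to True):
--     # the line is simply split on ' ', '\t', '\n', discarding the trailing segment.
--     return line.replace('\t', ' ').replace('\n', ' ').split(' ')[:-1]
-- ===== Notes on version B (the rewrite author's own statement) =====
-- stated objective: simpler
-- what changed: A's quote/escape states are unreachable dead code, so the per-character state machine is replaced by a one-line pipeline: normalise tab/newline to space, split on space, drop the trailing segment.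
import Mathlib
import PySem

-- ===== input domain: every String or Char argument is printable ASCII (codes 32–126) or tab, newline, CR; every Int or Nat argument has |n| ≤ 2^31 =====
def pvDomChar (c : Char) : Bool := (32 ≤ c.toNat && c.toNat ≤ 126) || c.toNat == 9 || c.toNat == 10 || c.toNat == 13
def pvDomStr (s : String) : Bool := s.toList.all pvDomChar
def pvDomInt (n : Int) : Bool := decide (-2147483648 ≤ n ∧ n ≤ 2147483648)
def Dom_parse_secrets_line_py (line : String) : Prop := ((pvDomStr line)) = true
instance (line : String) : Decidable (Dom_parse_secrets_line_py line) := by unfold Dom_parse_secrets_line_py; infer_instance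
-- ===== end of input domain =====

-- B replaces A's per-character quote/escape state machine (whose quote/escape states are
-- unreachable) by one replace-replace-split-drop pipeline over the whole line (objective: simpler).

-- ===== PORT A =====
-- the per-character loop of A, state = (fields, in_quote, escaped, field); strings as List Char,
-- fields materialised as String at the end (field += c is field ++ [c])
def parseSecretsLoop : List Char → List (List Char) → Bool → Bool → List Char → List (List Char)
  | [], fields, _, _, _ => fields
  | c :: cs, fields, in_quote, escaped, field =>
    if in_quote then
      if c = '"' ∧ escaped = false then
        parseSecretsLoop cs (fields ++ [field]) false escaped []
      else
        parseSecretsLoop cs fields in_quote escaped (field ++ [c])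
    else if escaped = true then
      if c = ' ' ∨ c = '\t' ∨ c = '#' ∨ c = '\\' ∨ c = '"' then
        parseSecretsLoop cs fields in_quote false (field ++ [c])
      else
        parseSecretsLoop cs fields in_quote false (field ++ ['\\'] ++ [c])
    else if c = ' ' ∨ c = '\t' ∨ c = '\n' then
      parseSecretsLoop cs (fields ++ [field]) in_quote escaped []
    else
      parseSecretsLoop cs fields in_quote escaped (field ++ [c])

def parse_secrets_line_py (line : String) : List String :=
  (parseSecretsLoop line.toList [] false false []).map String.ofList

-- ===== PORT B =====
-- line.replace('\t',' ').replace('\n',' ').split(' ')[:-1]; split(' ') has a nonempty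
-- separator so PySem.Str.split? is always `some` and the getD default is never used
def parse_secrets_line_py_alt (line : String) : List String :=
  PySem.List.slice
    ((PySem.Str.split? (PySem.Str.replace (PySem.Str.replace line "\t" " ") "\n" " ") " ").getD [])
    none (some (-1))

-- ===== PRECONDITION & SPEC =====
def Spec_parse_secrets_line_py (line : String) (out : List String) : Prop := out = parse_secrets_line_py_alt line
instance (line : String) (out : List String) : Decidable (Spec_parse_secrets_line_py line out) := by unfold Spec_parse_secrets_line_py; infer_instance

-- ===== CLAIM (what is proved, stated in full; the proofs are below) =====
def Claim_equal_parse_secrets_line_py : Prop := ∀ (line : String), Dom_parse_secrets_line_py line → Spec_parse_secrets_line_py line (parse_secrets_line_py line)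

-- ===== LEMMAS AND PROOFS =====

-- split a char list on ' '/'\t'/'\n', keeping empty segments (the common spec of both sides)
def splitDelims : List Char → List (List Char)
  | [] => [[]]
  | c :: cs =>
    if c = ' ' ∨ c = '\t' ∨ c = '\n' then [] :: splitDelims cs
    else match splitDelims cs with
      | [] => [[c]]
      | f :: r => (c :: f) :: r

def consHead (p : List Char) : List (List Char) → List (List Char)
  | [] => [p]
  | f :: r => (p ++ f) :: r

theorem splitDelims_ne_nil (cs : List Char) : splitDelims cs ≠ [] := by
  cases cs with
  | nil => simp [splitDelims]
  | cons c cs =>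
    simp only [splitDelims]
    split
    · simp
    · cases h : splitDelims cs <;> simp

theorem consHead_consHead (p q : List Char) (l : List (List Char)) :
    consHead p (consHead q l) = consHead (p ++ q) l := by
  cases l <;> simp [consHead]

theorem consHead_nil (l : List (List Char)) (h : l ≠ []) : consHead [] l = l := by
  cases l with
  | nil => exact absurd rfl h
  | cons f r => simp [consHead]

-- A's loop in the reachable (unquoted, unescaped) state appends the split of field++cs
theorem parseSecretsLoop_eq (cs : List Char) :
    ∀ fields field, parseSecretsLoop cs fields false false field
      = fields ++ (consHead field (splitDelims cs)).dropLast := by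
  induction cs with
  | nil => intro fields field; simp [parseSecretsLoop, consHead, splitDelims]
  | cons c cs ih =>
    intro fields field
    by_cases hd : c = ' ' ∨ c = '\t' ∨ c = '\n'
    · have h1 : parseSecretsLoop (c :: cs) fields false false field
          = parseSecretsLoop cs (fields ++ [field]) false false [] := by
        simp [parseSecretsLoop, hd]
      rw [h1, ih, consHead_nil _ (splitDelims_ne_nil cs)]
      have h2 : splitDelims (c :: cs) = [] :: splitDelims cs := by simp [splitDelims, hd]
      rw [h2]
      have h3 : consHead field ([] :: splitDelims cs) = field :: splitDelims cs := by
        simp [consHead]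
      rw [h3, List.dropLast_cons_of_ne_nil (splitDelims_ne_nil cs)]
      simp
    · have h1 : parseSecretsLoop (c :: cs) fields false false field
          = parseSecretsLoop cs fields false false (field ++ [c]) := by
        simp only [parseSecretsLoop]
        simp [hd]
      rw [h1, ih]
      have h2 : splitDelims (c :: cs) = consHead [c] (splitDelims cs) := by
        simp only [splitDelims, hd, if_false]
        cases h : splitDelims cs with
        | nil => simp [consHead]
        | cons f r => simp [consHead]
      rw [h2, consHead_consHead]

-- characterisation of PySem.Chars.replace with single-char old/new as a map
theorem replaceGo_single (o n : Char) (l : List Char) :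
    ∀ fuel acc, l.length ≤ fuel →
      PySem.Chars.replace.go [o] [n] fuel l acc
        = acc.reverse ++ l.map (fun c => if c = o then n else c) := by
  induction l with
  | nil => intro fuel acc _; cases fuel <;> simp [PySem.Chars.replace.go]
  | cons c t ih =>
    intro fuel acc hf
    cases fuel with
    | zero => simp at hf
    | succ fuel =>
      simp only [PySem.Chars.replace.go]
      by_cases hc : c = o
      · have : [o].isPrefixOf (c :: t) = true := by simp [List.isPrefixOf, hc]
        rw [if_pos this]
        have := ih fuel ([n].reverse ++ acc) (by simpa using Nat.le_of_succ_le_succ hf)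
        simpa [hc] using this
      · have : [o].isPrefixOf (c :: t) = false := by
          simp [List.isPrefixOf]; exact fun h => (hc h.symm).elim
        rw [if_neg (by simp [this])]
        have := ih fuel (c :: acc) (by simpa using Nat.le_of_succ_le_succ hf)
        simpa [hc] using this

theorem replace_single (o n : Char) (l : List Char) :
    PySem.Chars.replace l [o] [n] = l.map (fun c => if c = o then n else c) := by
  simp only [PySem.Chars.replace]
  rw [if_neg (by simp)]
  simpa using replaceGo_single o n l l.length [] (le_refl _)

-- characterisation of PySem.Chars.splitOn with single-char separator
def splitSpace : List Char → List (List Char)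
  | [] => [[]]
  | c :: cs => if c = ' ' then [] :: splitSpace cs else consHead [c] (splitSpace cs)

theorem splitSpace_ne_nil (cs : List Char) : splitSpace cs ≠ [] := by
  cases cs with
  | nil => simp [splitSpace]
  | cons c cs =>
    simp only [splitSpace]
    split
    · simp
    · cases h : splitSpace cs <;> simp [consHead]

theorem splitOnGo_space (l : List Char) :
    ∀ fuel cur acc, l.length ≤ fuel →
      PySem.Chars.splitOn.go [' '] fuel l cur acc
        = acc.reverse ++ consHead cur.reverse (splitSpace l) := by
  induction l with
  | nil => intro fuel cur acc _; cases fuel <;> simp [PySem.Chars.splitOn.go, splitSpace, consHead]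
  | cons c rest ih =>
    intro fuel cur acc hf
    cases fuel with
    | zero => simp at hf
    | succ fuel =>
      simp only [PySem.Chars.splitOn.go]
      by_cases hc : c = ' '
      · have : [' '].isPrefixOf (c :: rest) = true := by simp [List.isPrefixOf, hc]
        rw [if_pos this]
        have := ih fuel [] (cur.reverse :: acc) (by simpa using Nat.le_of_succ_le_succ hf)
        simp only [List.length_nil, List.length_cons, List.drop_succ_cons, List.drop_zero] at this ⊢
        rw [this]
        simp only [splitSpace, if_pos hc, List.reverse_cons, List.reverse_nil,
          List.append_assoc, List.nil_append]
        rw [consHead_nil _ (splitSpace_ne_nil rest)]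
        simp [consHead]
      · have : [' '].isPrefixOf (c :: rest) = false := by
          simp [List.isPrefixOf]; exact fun h => (hc h.symm).elim
        rw [if_neg (by simp [this])]
        have := ih fuel (c :: cur) acc (by simpa using Nat.le_of_succ_le_succ hf)
        rw [this]
        have h2 : splitSpace (c :: rest) = consHead [c] (splitSpace rest) := by
          simp [splitSpace, hc]
        rw [h2, consHead_consHead]
        simp

theorem splitOn_space (l : List Char) :
    PySem.Chars.splitOn l [' '] = splitSpace l := by
  simp only [PySem.Chars.splitOn]
  rw [splitOnGo_space l (l.length + 1) [] [] (Nat.le_succ _)]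
  simpa using consHead_nil _ (splitSpace_ne_nil l)

-- splitting the space-normalised line on ' ' is splitting the line on the three delimiters
theorem splitSpace_map (l : List Char) :
    splitSpace (l.map (fun c => if c = '\t' then ' ' else c)
                  |>.map (fun c => if c = '\n' then ' ' else c)) = splitDelims l := by
  induction l with
  | nil => rfl
  | cons c cs ih =>
    simp only [List.map_cons]
    by_cases hd : c = ' ' ∨ c = '\t' ∨ c = '\n'
    · have h1 : ((if ((if c = '\t' then ' ' else c)) = '\n' then ' ' else (if c = '\t' then ' ' else c))) = ' ' := by
        rcases hd with h | h | h <;> simp [h]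
      rw [h1]
      simp only [splitSpace, splitDelims, if_pos rfl, if_pos hd]
      rw [ih]
      simp
    · push_neg at hd
      obtain ⟨h1, h2, h3⟩ := hd
      have he : ((if ((if c = '\t' then ' ' else c)) = '\n' then ' ' else (if c = '\t' then ' ' else c))) = c := by
        simp [h2, h3]
      rw [he]
      simp only [splitSpace, splitDelims, if_neg h1, if_neg (by tauto : ¬(c = ' ' ∨ c = '\t' ∨ c = '\n'))]
      rw [ih]
      cases h : splitDelims cs with
      | nil => simp [consHead]
      | cons f r => simp [consHead]

theorem slice_neg_one {α : Type} (l : List α) :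
    PySem.List.slice l none (some (-1)) = l.dropLast := by
  cases l with
  | nil => simp [PySem.List.slice, PySem.List.clampIdx]
  | cons x xs =>
    simp [PySem.List.slice, PySem.List.clampIdx, List.dropLast_eq_take]
    congr 1
    split_ifs <;> omega

-- ===== VERDICT (by name: the statement is the Claim_ definition above) =====
theorem parse_secrets_line_py_spec : Claim_equal_parse_secrets_line_py := by
  intro line _
  unfold Spec_parse_secrets_line_py parse_secrets_line_py parse_secrets_line_py_alt
  -- B side: turn the string pipeline into char-level operations
  have hsplit := PySem.Str.split?_map
    (PySem.Str.replace (PySem.Str.replace line "\t" " ") "\n" " ") " "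
  have hrep : (PySem.Str.replace (PySem.Str.replace line "\t" " ") "\n" " ").toList
      = (line.toList.map (fun c => if c = '\t' then ' ' else c)).map
          (fun c => if c = '\n' then ' ' else c) := by
    rw [PySem.Str.toList_replace, PySem.Str.toList_replace]
    have h1 := replace_single '\t' ' ' line.toList
    have h2 := replace_single '\n' ' '
      (line.toList.map (fun c => if c = '\t' then ' ' else c))
    simpa [h1] using h2
  rw [show (" " : String).toList = [' '] from rfl] at hsplit
  rw [PySem.Chars.split?] at hsplit
  rw [if_neg (by simp)] at hsplit
  rw [hrep, splitOn_space, splitSpace_map] at hsplit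
  -- the split result on the String side is the char-level split mapped through String.ofList
  obtain ⟨parts, hp⟩ : ∃ parts, PySem.Str.split?
      (PySem.Str.replace (PySem.Str.replace line "\t" " ") "\n" " ") " " = some parts := by
    cases h : PySem.Str.split? (PySem.Str.replace (PySem.Str.replace line "\t" " ") "\n" " ") " " with
    | none => rw [h] at hsplit; simp at hsplit
    | some parts => exact ⟨parts, rfl⟩
  rw [hp] at hsplit ⊢
  simp only [Option.map_some, Option.some_inj] at hsplit
  have hparts : parts = (splitDelims line.toList).map String.ofList := by
    have h := congrArg (List.map String.ofList) hsplit
    rw [List.map_map] at h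
    simpa [Function.comp_def, String.ofList_toList] using h
  -- A side
  rw [parseSecretsLoop_eq line.toList [] [],
      consHead_nil _ (splitDelims_ne_nil line.toList)]
  rw [Option.getD_some, hparts, slice_neg_one]
  rw [← List.map_dropLast]
  simp
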